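-- pv_equiv track=rewrite | github.com/magicbrew53/AEC-Market-Analyzer | backend/lib/ingest.py | _detect_sector_columns
-- ===== SOURCE A (Python) =====
-- import unicodedata
--
-- SECTOR_HEADER_PATTERNS = {
--     "gen_bldg": ["general_building", "general building", "gen bldg", "gen_bldg"],
--     "manufacturing": ["manufacturing", "mfg"],
--     "power": ["power"],
--     "water_supply": ["water_supply", "water supply"],
--     "sewer_waste": ["sewer_waste", "sewer/waste", "sewer waste"],
--     "ind_pet": [
--         "industrial/oil&gas",
--         "industrial/petroleum",
--         "industrial_petroleum",
--         "indus/petro",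
--     ],
--     "transportation": ["transportation", "transp"],
--     "haz_waste": ["hazardous_waste", "hazardous waste", "haz waste", "haz_waste"],
--     "telecom": ["telecommunications", "telecom"],
--     "other": ["other"],
-- }
--
-- def _normalize_header(h) -> str:
--     """Lowercase, strip whitespace and Unicode oddities."""
--     if h is None:
--         return ""
--     s = str(h).strip().lower()
--     s = unicodedata.normalize("NFKD", s)
--     return s
--
-- def _is_pct_header(h: str) -> bool:
--     """Check if a normalized header is a percentage column."""
--     return ("%" in h) or ("(%)" in h) or h.endswith(" %") or "_pct" in h or " pct" in h
--
-- def _detect_sector_columns(headers: list[str]) -> dict[str, dict[str, int]]: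
--     """
--     For each canonical sector, find the column indices of its % and $ columns.
--
--     Returns dict like {"gen_bldg": {"pct": 7, "dol": 8}, ...}
--     """
--     norm = [_normalize_header(h) for h in headers]
--     result: dict[str, dict[str, int]] = {}
--
--     for sector, patterns in SECTOR_HEADER_PATTERNS.items():
--         pct_idx = None
--         dol_idx = None
--         for i, h in enumerate(norm):
--             if not h:
--                 continue
--             # Match this header against any of the sector's patterns
--             matched = any(p in h for p in patterns)
--             if not matched:
--                 continue
--             # Don't let "other" capture "Hazardous Waste %" etc. — "other" must be
--             # a standalone token, not buried in another sector name. Skip if we already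
--             # bound this column to another sector.
--             if sector == "other" and not (h.startswith("other") or h == "other %" or " other" in h):
--                 # Be stricter for "other" since it's a generic word
--                 # accept "other %", "other $m", "other rev ($m)", "OTHER %"
--                 pass
--
--             if _is_pct_header(h) and pct_idx is None:
--                 pct_idx = i
--             elif not _is_pct_header(h) and dol_idx is None:
--                 # Heuristic: dollar columns come right after % columns and contain
--                 # rev/$m/$mil tokens, OR they're the next column after the % col with no %.
--                 dol_idx = i
--
--         if pct_idx is not None or dol_idx is not None:
--             result[sector] = {"pct": pct_idx, "dol": dol_idx}
--
--     return result
-- ===== SOURCE B (Python) =====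
-- import unicodedata
--
-- SECTOR_HEADER_PATTERNS = {
--     "gen_bldg": ["general_building", "general building", "gen bldg", "gen_bldg"],
--     "manufacturing": ["manufacturing", "mfg"],
--     "power": ["power"],
--     "water_supply": ["water_supply", "water supply"],
--     "sewer_waste": ["sewer_waste", "sewer/waste", "sewer waste"],
--     "ind_pet": [
--         "industrial/oil&gas",
--         "industrial/petroleum",
--         "industrial_petroleum",
--         "indus/petro",
--     ],
--     "transportation": ["transportation", "transp"],
--     "haz_waste": ["hazardous_waste", "hazardous waste", "haz waste", "haz_waste"],
--     "telecom": ["telecommunications", "telecom"],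
--     "other": ["other"],
-- }
--
-- def _normalize_header(h) -> str:
--     """Lowercase, strip whitespace and Unicode oddities."""
--     if h is None:
--         return ""
--     s = str(h).strip().lower()
--     return unicodedata.normalize("NFKD", s)
--
-- def _is_pct_header(h: str) -> bool:
--     """Check if a normalized header is a percentage column."""
--     return ("%" in h) or ("(%)" in h) or h.endswith(" %") or "_pct" in h or " pct" in h
--
-- def _detect_sector_columns(headers: list[str]) -> dict[str, dict[str, int]]:
--     """Walk the headers BACK TO FRONT with unconditional overwrite: processing
--     columns in decreasing index order, every matching header simply overwrites the
--     sector's pct or dol slot, so the smallest matching index ends up winning —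
--     no 'first empty slot' guards and no per-sector scan are needed."""
--     slots: dict[str, dict] = {}
--     for i, h in reversed(list(enumerate(headers))):
--         hn = _normalize_header(h)
--         if not hn:
--             continue
--         key = "pct" if _is_pct_header(hn) else "dol"
--         for sector, patterns in SECTOR_HEADER_PATTERNS.items():
--             if any(p in hn for p in patterns):
--                 slots.setdefault(sector, {"pct": None, "dol": None})[key] = i
--     return {s: slots[s] for s in SECTOR_HEADER_PATTERNS if s in slots}
-- ===== Notes on version B (the rewrite author's own statement) =====
-- stated objective: alternative
-- what changed: B replaces A's per-sector forward scans with first-empty-slot guards by a single back-to-front pass with unconditional overwrite: headers are processed in decreasing index order, every matching header overwrites the pct/dol slot of each sector it matches (so the smallest index wins with no state guards), and results are emitted in sector order; A's dead 'other' pass-block is dropped.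
import Mathlib
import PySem

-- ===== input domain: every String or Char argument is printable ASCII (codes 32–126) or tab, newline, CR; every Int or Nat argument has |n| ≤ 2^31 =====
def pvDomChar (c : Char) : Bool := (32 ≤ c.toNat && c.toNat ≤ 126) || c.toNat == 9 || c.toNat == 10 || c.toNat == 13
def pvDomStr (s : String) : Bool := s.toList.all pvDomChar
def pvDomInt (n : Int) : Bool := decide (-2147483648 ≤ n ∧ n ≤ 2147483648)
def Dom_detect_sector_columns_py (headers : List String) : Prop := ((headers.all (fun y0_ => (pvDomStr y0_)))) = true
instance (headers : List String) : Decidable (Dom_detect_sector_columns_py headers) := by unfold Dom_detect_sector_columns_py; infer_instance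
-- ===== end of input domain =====

-- B walks the headers back to front with unconditional overwrite (smallest index wins) instead of A's per-sector forward scans with first-empty-slot guards; A's dead 'other' branch is dropped. Same output.


-- ===== PORT A =====
-- SECTOR_HEADER_PATTERNS (module constant, insertion order)
def sectorPatterns : List (String × List String) :=
  [("gen_bldg", ["general_building", "general building", "gen bldg", "gen_bldg"]),
   ("manufacturing", ["manufacturing", "mfg"]),
   ("power", ["power"]),
   ("water_supply", ["water_supply", "water supply"]),
   ("sewer_waste", ["sewer_waste", "sewer/waste", "sewer waste"]),
   ("ind_pet", ["industrial/oil&gas", "industrial/petroleum", "industrial_petroleum", "indus/petro"]),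
   ("transportation", ["transportation", "transp"]),
   ("haz_waste", ["hazardous_waste", "hazardous waste", "haz waste", "haz_waste"]),
   ("telecom", ["telecommunications", "telecom"]),
   ("other", ["other"])]

-- _normalize_header: h is a str here (the None branch is unreachable under the type convention);
-- unicodedata.normalize("NFKD", ·) is the identity on the ASCII input domain, so the port is strip+lower.
def normalizeHeader (h : String) : String := PySem.Str.lower (PySem.Str.strip h)

-- _is_pct_header
def isPctHeader (h : String) : Bool :=
  PySem.Str.isIn "%" h || PySem.Str.isIn "(%)" h || PySem.Str.endswith h " %" ||
  PySem.Str.isIn "_pct" h || PySem.Str.isIn " pct" h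

-- A's inner loop body over (i, h) with h already normalized (the 'other' branch of A is a no-op 'pass')
def updA (pats : List String) (st : Option Int × Option Int) (ih : Int × String) : Option Int × Option Int :=
  if ih.2 = "" then st
  else if (pats.any (fun p => PySem.Str.isIn p ih.2)) = false then st
  else if isPctHeader ih.2 = true ∧ st.1 = none then (some ih.1, st.2)
  else if isPctHeader ih.2 = false ∧ st.2 = none then (st.1, some ih.1)
  else st

def detect_sector_columns_py (headers : List String) : List (String × List (String × Option Int)) :=
  let norm := headers.map normalizeHeader
  (sectorPatterns.foldl
    (fun (result : PySem.Dict String (List (String × Option Int))) sp =>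
      let st := (PySem.List.enumerate norm).foldl (updA sp.2) (none, none)
      if st.1 ≠ none ∨ st.2 ≠ none then result.insert sp.1 [("pct", st.1), ("dol", st.2)]
      else result)
    PySem.Dict.empty).items

-- ===== PORT B =====
-- slots.setdefault(sector, {"pct": None, "dol": None})[key] = i is, as a value, an insert of
-- the pair obtained from the current lookup (defaulting to (none, none)) with one slot OVERWRITTEN:
def setSlot (isP : Bool) (i : Int) (o : Option (Option Int × Option Int)) : Option Int × Option Int :=
  let s := o.getD (none, none)
  if isP then (some i, s.2) else (s.1, some i)

-- body of B's inner loop over the sectors, for one header (hn normalized, isP its pct-ness, i its index)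
def istepB (hn : String) (isP : Bool) (i : Int)
    (slots : PySem.Dict String (Option Int × Option Int)) (sp : String × List String) :
    PySem.Dict String (Option Int × Option Int) :=
  if (sp.2.any (fun p => PySem.Str.isIn p hn)) = true then
    slots.insert sp.1 (setSlot isP i (slots.get? sp.1))
  else slots

-- body of B's reverse pass over reversed(list(enumerate(headers)))
def bstepB (slots : PySem.Dict String (Option Int × Option Int)) (ih : Int × String) :
    PySem.Dict String (Option Int × Option Int) :=
  let hn := normalizeHeader ih.2
  if hn = "" then slots
  else sectorPatterns.foldl (istepB hn (isPctHeader hn) ih.1) slots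

def detect_sector_columns_py_alt (headers : List String) : List (String × List (String × Option Int)) :=
  let slots := ((PySem.List.enumerate headers).reverse).foldl bstepB PySem.Dict.empty
  (sectorPatterns.foldl
    (fun (out : PySem.Dict String (List (String × Option Int))) sp =>
      match slots.get? sp.1 with
      | some s => out.insert sp.1 [("pct", s.1), ("dol", s.2)]
      | none => out)
    PySem.Dict.empty).items

-- ===== PRECONDITION & SPEC =====
def Spec_detect_sector_columns_py (headers : List String) (out : List (String × List (String × Option Int))) : Prop := out = detect_sector_columns_py_alt headers
instance (headers : List String) (out : List (String × List (String × Option Int))) : Decidable (Spec_detect_sector_columns_py headers out) := by unfold Spec_detect_sector_columns_py; infer_instance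

-- ===== CLAIM (what is proved, stated in full; the proofs are below) =====
def Claim_equal_detect_sector_columns_py : Prop := ∀ (headers : List String), Dom_detect_sector_columns_py headers → Spec_detect_sector_columns_py headers (detect_sector_columns_py headers)

-- ===== LEMMAS AND PROOFS =====

-- B's per-sector entry is present iff a slot is set; emb maps A's per-sector state to B's dict entry
def emb (st : Option Int × Option Int) : Option (Option Int × Option Int) :=
  if st.1 = none ∧ st.2 = none then none else some st

-- B's per-sector update on an optional state, over a RAW header (normalization inside)
def uBrev (pats : List String) (o : Option (Option Int × Option Int)) (ih : Int × String) :
    Option (Option Int × Option Int) :=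
  if normalizeHeader ih.2 = "" then o
  else if (pats.any (fun p => PySem.Str.isIn p (normalizeHeader ih.2))) = true then
    some (setSlot (isPctHeader (normalizeHeader ih.2)) ih.1 o)
  else o

-- the first index whose normalized header is nonempty, matches, and has the wanted pct-ness
def fsel (pats : List String) (wantP : Bool) : List (Int × String) → Option Int
  | [] => none
  | ih :: tl =>
    if normalizeHeader ih.2 = "" then fsel pats wantP tl
    else if (pats.any (fun p => PySem.Str.isIn p (normalizeHeader ih.2))) = true then
      if isPctHeader (normalizeHeader ih.2) = wantP then some ih.1 else fsel pats wantP tl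
    else fsel pats wantP tl

-- left-biased choice (Python's 'keep the first bound value')
def oor (a b : Option Int) : Option Int := match a with | some x => some x | none => b

lemma oor_none_right (a : Option Int) : oor a none = a := by cases a <;> rfl

lemma emb_getD (s : Option Int × Option Int) : (emb s).getD (none, none) = s := by
  unfold emb
  by_cases h : s.1 = none ∧ s.2 = none
  · rw [if_pos h]; cases s; simp_all
  · rw [if_neg h]; rfl

lemma fsel_cons (pats : List String) (wantP : Bool) (ih : Int × String) (tl : List (Int × String)) :
    fsel pats wantP (ih :: tl) =
      if normalizeHeader ih.2 = "" then fsel pats wantP tl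
      else if (pats.any (fun p => PySem.Str.isIn p (normalizeHeader ih.2))) = true then
        if isPctHeader (normalizeHeader ih.2) = wantP then some ih.1 else fsel pats wantP tl
      else fsel pats wantP tl := rfl

-- A's per-sector fold computes the two independent first matches
lemma foldA_char (pats : List String) :
    ∀ (l : List (Int × String)) (st : Option Int × Option Int),
      l.foldl (fun st ih => updA pats st (ih.1, normalizeHeader ih.2)) st =
        (oor st.1 (fsel pats true l), oor st.2 (fsel pats false l)) := by
  intro l
  induction l with
  | nil => intro st; simp only [List.foldl_nil, fsel, oor_none_right]
  | cons ih tl IH =>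
    intro st
    rw [List.foldl_cons, IH, fsel_cons, fsel_cons]
    rcases st with ⟨p, d⟩
    unfold updA
    by_cases h0 : normalizeHeader ih.2 = "" <;>
      cases hM : (pats.any fun p => PySem.Str.isIn p (normalizeHeader ih.2)) <;>
      cases hP : isPctHeader (normalizeHeader ih.2) <;>
      cases p <;> cases d <;>
      simp [h0, hM, hP, oor]

-- B's per-sector reverse fold computes the same two first matches, embedded
lemma foldB_char (pats : List String) :
    ∀ (l : List (Int × String)),
      l.foldr (fun x o => uBrev pats o x) none = emb (fsel pats true l, fsel pats false l) := by
  intro l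
  induction l with
  | nil => rfl
  | cons ih tl IH =>
    rw [List.foldr_cons, IH, fsel_cons, fsel_cons]
    unfold uBrev
    by_cases h0 : normalizeHeader ih.2 = "" <;>
      cases hM : (pats.any fun p => PySem.Str.isIn p (normalizeHeader ih.2)) <;>
      cases hP : isPctHeader (normalizeHeader ih.2) <;>
      (simp [h0, hM, hP, setSlot, emb_getD]) <;> simp [emb]

lemma fold_istepB_get_not_mem (hn : String) (isP : Bool) (i : Int) :
    ∀ (sps : List (String × List String)) (d : PySem.Dict String (Option Int × Option Int))
      (s : String), s ∉ sps.map Prod.fst →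
      (sps.foldl (istepB hn isP i) d).get? s = d.get? s := by
  intro sps
  induction sps with
  | nil => intro d s _; rfl
  | cons sp tl ih =>
    intro d s hs
    simp only [List.map_cons, List.mem_cons, not_or] at hs
    rw [List.foldl_cons, ih _ s hs.2]
    unfold istepB
    split
    · exact PySem.Dict.get?_insert_of_ne _ _ hs.1
    · rfl

lemma fold_istepB_get (hn : String) (isP : Bool) (i : Int) :
    ∀ (sps : List (String × List String)) (d : PySem.Dict String (Option Int × Option Int))
      (s : String) (pats : List String), (sps.map Prod.fst).Nodup → (s, pats) ∈ sps →
      (sps.foldl (istepB hn isP i) d).get? s =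
        if (pats.any (fun p => PySem.Str.isIn p hn)) = true then
          some (setSlot isP i (d.get? s))
        else d.get? s := by
  intro sps
  induction sps with
  | nil => intro d s pats _ hm; cases hm
  | cons sp tl ih =>
    intro d s pats hnd hm
    simp only [List.map_cons, List.nodup_cons] at hnd
    rcases List.mem_cons.mp hm with h | h
    · cases h
      rw [List.foldl_cons,
        fold_istepB_get_not_mem hn isP i tl _ s hnd.1]
      unfold istepB
      split
      · rw [PySem.Dict.get?_insert_self]
      · rfl
    · have hne : sp.1 ≠ s := by
        intro he
        exact hnd.1 (he ▸ List.mem_map.mpr ⟨(s, pats), h, rfl⟩)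
      have hg : (istepB hn isP i d sp).get? s = d.get? s := by
        unfold istepB
        split
        · exact PySem.Dict.get?_insert_of_ne _ _ (Ne.symm hne)
        · rfl
      rw [List.foldl_cons, ih _ s pats hnd.2 h, hg]

lemma sector_keys_nodup : (sectorPatterns.map Prod.fst).Nodup := by decide

lemma bstepB_get (d : PySem.Dict String (Option Int × Option Int)) (ih : Int × String)
    (s : String) (pats : List String) (hm : (s, pats) ∈ sectorPatterns) :
    (bstepB d ih).get? s = uBrev pats (d.get? s) ih := by
  by_cases h0 : normalizeHeader ih.2 = ""
  · simp [bstepB, uBrev, h0]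
  · simp only [bstepB, uBrev, if_neg h0]
    rw [fold_istepB_get _ _ _ sectorPatterns d s pats sector_keys_nodup hm]

lemma fold_bstepB_get :
    ∀ (l : List (Int × String)) (d : PySem.Dict String (Option Int × Option Int))
      (s : String) (pats : List String), (s, pats) ∈ sectorPatterns →
      (l.foldl bstepB d).get? s = l.foldl (uBrev pats) (d.get? s) := by
  intro l
  induction l with
  | nil => intro d s pats _; rfl
  | cons x tl ih =>
    intro d s pats hm
    rw [List.foldl_cons, List.foldl_cons, ih _ s pats hm, bstepB_get d x s pats hm]

-- enumerate over a mapped list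
lemma enumerate_map {α β : Type} (f : α → β) :
    ∀ (xs : List α) (s : Int),
      PySem.List.enumerate (xs.map f) s = (PySem.List.enumerate xs s).map (fun p => (p.1, f p.2)) := by
  intro xs
  induction xs with
  | nil => intro s; rfl
  | cons x tl ih =>
    intro s
    simp [PySem.List.enumerate_cons, ih]

-- the two emission folds agree given the per-sector correspondence
lemma out_fold_eq (f : List String → Option Int × Option Int)
    (g : String → Option (Option Int × Option Int)) :
    ∀ (sps : List (String × List String)) (acc : PySem.Dict String (List (String × Option Int))),
      (∀ sp ∈ sps, g sp.1 = emb (f sp.2)) →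
      sps.foldl
        (fun result sp =>
          let st := f sp.2
          if st.1 ≠ none ∨ st.2 ≠ none then result.insert sp.1 [("pct", st.1), ("dol", st.2)]
          else result) acc =
      sps.foldl
        (fun out sp =>
          match g sp.1 with
          | some s => out.insert sp.1 [("pct", s.1), ("dol", s.2)]
          | none => out) acc := by
  intro sps
  induction sps with
  | nil => intro acc _; rfl
  | cons sp tl ih =>
    intro acc hg
    rw [List.foldl_cons, List.foldl_cons]
    have h1 := hg sp (List.mem_cons_self ..)
    rcases hf : f sp.2 with ⟨p, d⟩
    rw [hf] at h1
    unfold emb at h1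
    by_cases h0 : p = none ∧ d = none
    · rw [if_pos h0] at h1
      simp only [hf, h0.1, h0.2, h1]
      rw [if_neg (by simp)]
      exact ih _ (fun x hx => hg x (List.mem_cons_of_mem _ hx))
    · rw [if_neg h0] at h1
      simp only [hf, h1]
      rw [if_pos (by tauto)]
      exact ih _ (fun x hx => hg x (List.mem_cons_of_mem _ hx))

-- ===== VERDICT (by name: the statement is the Claim_ definition above) =====
theorem detect_sector_columns_py_spec : Claim_equal_detect_sector_columns_py := by
  intro headers _
  unfold Spec_detect_sector_columns_py detect_sector_columns_py detect_sector_columns_py_alt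
  refine congrArg PySem.Dict.items
    (out_fold_eq
      (fun pats => (PySem.List.enumerate (headers.map normalizeHeader)).foldl (updA pats) (none, none))
      (fun s => (((PySem.List.enumerate headers).reverse).foldl bstepB PySem.Dict.empty).get? s)
      sectorPatterns PySem.Dict.empty ?_)
  intro sp hm
  beta_reduce
  rw [fold_bstepB_get _ _ sp.1 sp.2 hm]
  have h0 : PySem.Dict.get? (PySem.Dict.empty : PySem.Dict String (Option Int × Option Int)) sp.1
      = (none : Option (Option Int × Option Int)) := rfl
  rw [h0, List.foldl_reverse, foldB_char, enumerate_map, List.foldl_map, foldA_char]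
  rfl
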